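-- pv_equiv track=rewrite | github.com/HelderGod/University | 2ano/2semestre/ALP/GIC/ex4.py | findInitial
-- ===== SOURCE A (Python) =====
-- def is_symbol(x):
--     return len(x) > 0 and (' ' not in x)
--
-- def is_variable(x):
--     return is_symbol(x) and x.isupper()
--
-- def findInitial(rules):
--     if len(rules) == 0:
--         return 'S'
--     count = 0
--     for c in rules:
--         for char in c:
--             if char == 'S':
--                 count = count + 1
--     if count > 0:
--         return 'S'
--     else:
--         for c in rules:
--             for char in c:
--                 if char.isupper() and is_variable(char):
--                     return char
-- ===== SOURCE B (Python) =====
-- def findInitial(rules):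
--     if len(rules) == 0:
--         return 'S'
--     found_s = False
--     first_upper = None
--     for rule in rules:
--         for char in rule:
--             if char == 'S':
--                 found_s = True
--             if first_upper is None and char.isupper():
--                 first_upper = char
--     if found_s:
--         return 'S'
--     else:
--         return first_upper
-- ===== Notes on version B (the rewrite author's own statement) =====
-- stated objective: simpler
-- what changed: Replaces A's two full nested scans (one counting 'S' occurrences, then a second searching for the first uppercase variable) by a single pass over all characters maintaining a found-S flag and the first uppercase character; the redundant is_symbol/is_variable helpers disappear since for a single character the test reduces to isupper.
import Mathlib
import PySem

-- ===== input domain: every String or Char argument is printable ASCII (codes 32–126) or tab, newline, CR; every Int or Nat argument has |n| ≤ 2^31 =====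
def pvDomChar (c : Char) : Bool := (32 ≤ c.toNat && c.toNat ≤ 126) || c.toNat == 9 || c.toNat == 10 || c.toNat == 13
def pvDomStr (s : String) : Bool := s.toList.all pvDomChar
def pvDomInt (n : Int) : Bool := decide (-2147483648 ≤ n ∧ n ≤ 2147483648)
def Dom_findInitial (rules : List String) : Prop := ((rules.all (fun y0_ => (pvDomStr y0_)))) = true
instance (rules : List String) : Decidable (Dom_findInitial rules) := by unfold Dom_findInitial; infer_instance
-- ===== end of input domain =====

-- B collapses A's two nested scans (count 'S', then search for the first uppercase
-- variable) into one single pass keeping a found-S flag and the first uppercase char (simpler).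


-- ===== PORT A =====
-- is_symbol(x) = len(x) > 0 and (' ' not in x)
def isSymbol (x : List Char) : Bool := decide (0 < x.length) && !(x.contains ' ')

-- x.isupper() for a string, hand-ported (no PySem string-level isupper): Python's
-- str.isupper() is "has a cased char and no lowercase char" — exact on the ASCII domain.
def pyStrIsupper (x : List Char) : Bool :=
  (x.any (fun c => PySem.Chars.isupper c || PySem.Chars.islower c)) && !(x.any PySem.Chars.islower)

-- is_variable(x) = is_symbol(x) and x.isupper()
def isVariable (x : List Char) : Bool := isSymbol x && pyStrIsupper x

-- the final for-loop of A: first char (as a 1-char string) with char.isupper() and is_variable(char)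
def findVarInRule : List Char → Option Char
  | [] => none
  | ch :: t => if PySem.Chars.isupper ch && isVariable [ch] then some ch else findVarInRule t

def findVarA : List String → Option String
  | [] => none
  | c :: rest =>
    match findVarInRule c.toList with
    | some ch => some (String.singleton ch)
    | none => findVarA rest

def findInitial (rules : List String) : Option String :=
  if rules.length = 0 then some "S"
  else
    let count : Int :=
      rules.foldl (fun acc c =>
        c.toList.foldl (fun acc char => if char = 'S' then acc + 1 else acc) acc) 0
    if count > 0 then some "S" else findVarA rules

-- ===== PORT B =====
-- one pass: state = (found_s, first_upper)
def stepB (st : Bool × Option Char) (ch : Char) : Bool × Option Char :=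
  ((if ch = 'S' then true else st.1),
   (if st.2.isNone && PySem.Chars.isupper ch then some ch else st.2))

def findInitial_alt (rules : List String) : Option String :=
  if rules = [] then some "S"
  else
    let st := rules.foldl (fun st rule => rule.toList.foldl stepB st) (false, none)
    if st.1 then some "S" else st.2.map String.singleton

-- ===== PRECONDITION & SPEC =====
def Spec_findInitial (rules : List String) (out : Option String) : Prop := out = findInitial_alt rules
instance (rules : List String) (out : Option String) : Decidable (Spec_findInitial rules out) := by unfold Spec_findInitial; infer_instance

-- ===== CLAIM (what is proved, stated in full; the proofs are below) =====
def Claim_equal_findInitial : Prop := ∀ (rules : List String), Dom_findInitial rules → Spec_findInitial rules (findInitial rules)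

-- ===== LEMMAS AND PROOFS =====

-- for a single character, A's compound test reduces to isupper
theorem cond_eq_isupper (ch : Char) :
    (PySem.Chars.isupper ch && isVariable [ch]) = PySem.Chars.isupper ch := by
  unfold isVariable isSymbol pyStrIsupper PySem.Chars.isupper PySem.Chars.islower
  simp only [List.contains_cons, List.any_cons, List.any_nil, List.contains_nil]
  by_cases h : ('A' ≤ ch ∧ ch ≤ 'Z')
  · have h1 : ¬ ('a' ≤ ch) := by
      intro hc
      have h2 := h.2
      simp only [Char.le_def, UInt32.le_iff_toNat_le] at hc h2
      have e1 : 'Z'.val.toNat = 90 := rfl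
      have e2 : 'a'.val.toNat = 97 := rfl
      omega
    have h2 : ¬ (' ' = ch) := by
      intro hc
      have hA := h.1
      rw [← hc] at hA
      exact absurd hA (by decide)
    simp [h.1, h.2, h1, h2]
  · rcases not_and_or.mp h with h' | h' <;> simp [h']

-- B's nested fold splits componentwise
theorem foldChars_split (cs : List Char) (s : Bool) (fu : Option Char) :
    cs.foldl stepB (s, fu) =
      (cs.foldl (fun a ch => if ch = 'S' then true else a) s,
       cs.foldl (fun a ch => if a.isNone && PySem.Chars.isupper ch then some ch else a) fu) := by
  induction cs generalizing s fu with
  | nil => rfl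
  | cons ch t ih => simp only [List.foldl_cons, stepB, ih]

theorem foldRules_split (rules : List String) (s : Bool) (fu : Option Char) :
    rules.foldl (fun st rule => rule.toList.foldl stepB st) (s, fu) =
      (rules.foldl (fun a rule => rule.toList.foldl (fun a ch => if ch = 'S' then true else a) a) s,
       rules.foldl (fun a rule => rule.toList.foldl (fun a ch => if a.isNone && PySem.Chars.isupper ch then some ch else a) a) fu) := by
  induction rules generalizing s fu with
  | nil => rfl
  | cons r t ih => simp only [List.foldl_cons, foldChars_split, ih]

-- A's count, char level
theorem countChars_eq (cs : List Char) (acc : Int) :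
    cs.foldl (fun acc char => if char = 'S' then acc + 1 else acc) acc
      = acc + (cs.countP (· = 'S') : Int) := by
  induction cs generalizing acc with
  | nil => simp
  | cons ch t ih =>
    simp only [List.foldl_cons, List.countP_cons, ih]
    by_cases h : ch = 'S'
    · simp [h]; ring
    · simp [h]

-- B's found-S flag, char level
theorem foldS_chars (cs : List Char) (s : Bool) :
    cs.foldl (fun a ch => if ch = 'S' then true else a) s = (s || cs.any (· = 'S')) := by
  induction cs generalizing s with
  | nil => simp
  | cons ch t ih =>
    rw [List.foldl_cons, ih]
    by_cases h : ch = 'S' <;> simp [h]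

-- count > 0 ↔ found_s, rule level
theorem count_pos_iff (rules : List String) (acc : Int) (s : Bool)
    (h : acc > 0 ↔ s = true) (h0 : 0 ≤ acc) :
    (rules.foldl (fun acc c => c.toList.foldl (fun acc char => if char = 'S' then acc + 1 else acc) acc) acc > 0)
      ↔ (rules.foldl (fun a rule => rule.toList.foldl (fun a ch => if ch = 'S' then true else a) a) s = true) := by
  induction rules generalizing acc s with
  | nil => simpa using h
  | cons r t ih =>
    simp only [List.foldl_cons]
    have hcnt : (0 : Int) ≤ (r.toList.countP (· = 'S') : Int) := Int.natCast_nonneg _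
    apply ih
    · rw [countChars_eq, foldS_chars]
      cases s with
      | false =>
        have hacc : ¬ acc > 0 := by simpa using h
        simp only [Bool.false_or]
        constructor
        · intro hp
          have hpos : 0 < (r.toList.countP (· = 'S') : Int) := by omega
          have hpos' : 0 < r.toList.countP (· = 'S') := by exact_mod_cast hpos
          rw [List.countP_pos_iff] at hpos'
          rcases hpos' with ⟨x, hx, hx'⟩
          simp only [List.any_eq_true]
          exact ⟨x, hx, hx'⟩
        · intro ha
          simp only [List.any_eq_true] at ha
          rcases ha with ⟨x, hx, hx'⟩
          have : 0 < r.toList.countP (· = 'S') := List.countP_pos_iff.mpr ⟨x, hx, hx'⟩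
          have : 0 < (r.toList.countP (· = 'S') : Int) := by exact_mod_cast this
          omega
      | true =>
        have hacc := h.mpr rfl
        simp [show acc + (r.toList.countP (· = 'S') : Int) > 0 from by omega]
    · rw [countChars_eq]; omega

-- B's first-upper fold freezes once set
theorem foldU_some (cs : List Char) (x : Char) :
    cs.foldl (fun a ch => if a.isNone && PySem.Chars.isupper ch then some ch else a) (some x) = some x := by
  induction cs with
  | nil => rfl
  | cons ch t ih => simpa using ih

theorem foldU_rules_some (rules : List String) (x : Char) :
    rules.foldl (fun a rule => rule.toList.foldl (fun a ch => if a.isNone && PySem.Chars.isupper ch then some ch else a) a) (some x) = some x := by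
  induction rules with
  | nil => rfl
  | cons r t ih => simp only [List.foldl_cons, foldU_some]; exact ih

-- A's per-rule search equals B's fold from none, char level
theorem findVarInRule_eq (cs : List Char) :
    findVarInRule cs = cs.foldl (fun a ch => if a.isNone && PySem.Chars.isupper ch then some ch else a) none := by
  induction cs with
  | nil => rfl
  | cons ch t ih =>
    simp only [findVarInRule, cond_eq_isupper, List.foldl_cons, Option.isNone_none, Bool.true_and]
    by_cases h : PySem.Chars.isupper ch = true
    · rw [if_pos h, if_pos h, foldU_some]
    · rw [if_neg h, if_neg h]; exact ih

-- A's search equals B's fold from none, rule level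
theorem findVarA_eq (rules : List String) :
    findVarA rules =
      (rules.foldl (fun a rule => rule.toList.foldl (fun a ch => if a.isNone && PySem.Chars.isupper ch then some ch else a) a) none).map String.singleton := by
  induction rules with
  | nil => rfl
  | cons r t ih =>
    cases h : r.toList.foldl (fun a ch => if a.isNone && PySem.Chars.isupper ch then some ch else a) none with
    | none =>
      simp only [findVarA, findVarInRule_eq, h, List.foldl_cons]
      exact ih
    | some ch =>
      simp only [findVarA, findVarInRule_eq, h, List.foldl_cons, foldU_rules_some, Option.map_some]

-- ===== VERDICT (by name: the statement is the Claim_ definition above) =====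
theorem findInitial_spec : Claim_equal_findInitial := by
  intro rules _
  unfold Spec_findInitial findInitial findInitial_alt
  by_cases hempty : rules = []
  · simp [hempty]
  · have hlen : ¬ rules.length = 0 := by simpa using hempty
    simp only [hlen, if_false, hempty, foldRules_split]
    have hiff := count_pos_iff rules 0 false (by simp) le_rfl
    by_cases hc : 0 < rules.foldl (fun acc c => c.toList.foldl (fun acc char => if char = 'S' then acc + 1 else acc) acc) (0:Int)
    · rw [if_pos hc, if_pos (hiff.mp hc)]
    · have hb : rules.foldl (fun a rule => rule.toList.foldl (fun a ch => if ch = 'S' then true else a) a) false = false := by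
        have := (not_iff_not.mpr hiff).mp hc
        simpa using this
      rw [if_neg hc, if_neg (by rw [hb]; simp), findVarA_eq]
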